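-- pv_equiv track=rewrite | github.com/JakeSaunders1995/comp16321MarkingMid | CW_rugby/rugby_f18903ls/rugby_f18903ls.py | scoreCalculator
-- ===== SOURCE A (Python) =====
-- def scoreCalculator(list):
--     t1, t2 = 0, 0
--     for match in list:
--         if (match[0:2] == "T1"):
--             #team 1 win
--             if (match[2] == "t"):
--                 t1 += 5
--             elif (match[2] == "c"):
--                 t1 += 2
--             elif (match[2] == "p"):
--                 t1 += 3
--             elif (match[2] == "d"):
--                 t1 += 3
--         elif (match[0:2] == "T2"):
--             #team 2 win
--             if (match[2] == "t"):
--                 t2 += 5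
--             elif (match[2] == "c"):
--                 t2 += 2
--             elif (match[2] == "p"):
--                 t2 += 3
--             elif (match[2] == "d"):
--                 t2 += 3
--     return t1, t2
-- ===== SOURCE B (Python) =====
-- def scoreCalculator(list):
--     # Histogram of 3-char event prefixes, then each team's score is a fixed
--     # weighted sum over the eight scoring patterns.
--     counts = {}
--     for k in [m[:3] for m in list]:
--         counts[k] = counts.get(k, 0) + 1
--
--     def total(table):
--         return sum(p * counts.get(k, 0) for k, p in table)
--
--     return (total([("T1t", 5), ("T1c", 2), ("T1p", 3), ("T1d", 3)]),
--             total([("T2t", 5), ("T2c", 2), ("T2p", 3), ("T2d", 3)]))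
-- ===== Notes on version B (the rewrite author's own statement) =====
-- stated objective: alternative
-- what changed: Replaces the single per-event branch-and-accumulate loop (two mutable totals, duplicated four-way elif chains) by a two-stage counting algorithm: first build a histogram of the 3-character event prefixes, then compute each team's score as a fixed weighted sum of the eight scoring-pattern counts.
-- crash fix: A raises IndexError when an element is exactly 'T1' or 'T2' (team match but no third character); B returns normally, counting such an event as 0 points. — e.g. on scoreCalculator(["T1t", "T2"]): A raises IndexError, B returns (5, 0)
import Mathlib
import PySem

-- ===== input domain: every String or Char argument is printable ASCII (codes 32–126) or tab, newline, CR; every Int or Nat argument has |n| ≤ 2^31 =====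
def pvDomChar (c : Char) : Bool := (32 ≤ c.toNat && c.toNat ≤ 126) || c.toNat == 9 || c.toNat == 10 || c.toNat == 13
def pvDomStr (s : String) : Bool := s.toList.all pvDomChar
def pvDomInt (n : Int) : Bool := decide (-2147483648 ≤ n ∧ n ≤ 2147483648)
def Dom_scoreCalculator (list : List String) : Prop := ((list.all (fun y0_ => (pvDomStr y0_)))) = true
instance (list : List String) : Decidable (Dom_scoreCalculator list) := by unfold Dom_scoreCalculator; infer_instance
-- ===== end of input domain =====

-- B replaces A's per-event branch-and-accumulate loop by a two-stage counting algorithm: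
-- a histogram of the 3-char event prefixes, then each team's score as a fixed weighted
-- sum over the eight scoring patterns (objective: alternative). Where A raises IndexError
-- (an element exactly "T1"/"T2"), B returns, counting that event as 0 (see Raises_ below).

-- ===== PORT A =====
-- literal transliteration of A's loop: state (t1, t2); match[2] via pyGet? (none = IndexError,
-- excluded by Pre_; the port leaves the state unchanged there).
def scoreCalculator (list : List String) : Int × Int :=
  list.foldl (fun st m =>
    if PySem.Str.slice m (some 0) (some 2) = "T1" then
      match PySem.Str.pyGet? m 2 with
      | some c =>
        if c = 't' then (st.1 + 5, st.2)
        else if c = 'c' then (st.1 + 2, st.2)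
        else if c = 'p' then (st.1 + 3, st.2)
        else if c = 'd' then (st.1 + 3, st.2)
        else st
      | none => st
    else if PySem.Str.slice m (some 0) (some 2) = "T2" then
      match PySem.Str.pyGet? m 2 with
      | some c =>
        if c = 't' then (st.1, st.2 + 5)
        else if c = 'c' then (st.1, st.2 + 2)
        else if c = 'p' then (st.1, st.2 + 3)
        else if c = 'd' then (st.1, st.2 + 3)
        else st
      | none => st
    else st) (0, 0)

-- ===== PORT B =====
-- counts[k] = counts.get(k, 0) + 1 over [m[:3] for m in list]
def pvCounts (list : List String) : PySem.Dict String Int :=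
  (list.map (fun m => PySem.Str.slice m (some 0) (some 3))).foldl
    (fun d k => d.insert k (d.getD k 0 + 1)) PySem.Dict.empty

-- sum(p * counts.get(k, 0) for k, p in table)
def pvTotal (counts : PySem.Dict String Int) (table : List (String × Int)) : Int :=
  (table.map (fun kp => kp.2 * counts.getD kp.1 0)).sum

def scoreCalculator_alt (list : List String) : Int × Int :=
  let counts := pvCounts list
  (pvTotal counts [("T1t", 5), ("T1c", 2), ("T1p", 3), ("T1d", 3)],
   pvTotal counts [("T2t", 5), ("T2c", 2), ("T2p", 3), ("T2d", 3)])

-- ===== PRECONDITION & SPEC =====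
-- Pre_ excludes exactly the inputs where A raises IndexError: an element equal to "T1" or "T2"
-- (the team branch is taken but match[2] does not exist).
def Pre_scoreCalculator (list : List String) : Prop :=
  ∀ s ∈ list, s ≠ "T1" ∧ s ≠ "T2"
instance (list : List String) : Decidable (Pre_scoreCalculator list) := by
  unfold Pre_scoreCalculator; infer_instance

def pvWitness_scoreCalculator : List String := ["T1t", "T2d", "T1c", "xx", "T2p"]

-- A raises IndexError exactly when an element is "T1" or "T2"; B returns, counting 0 points for it.
def Raises_scoreCalculator (list : List String) : Prop :=
  ∃ s ∈ list, s = "T1" ∨ s = "T2"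
instance (list : List String) : Decidable (Raises_scoreCalculator list) := by
  unfold Raises_scoreCalculator; infer_instance

def pvRaiseWitness_scoreCalculator : List String := ["T1t", "T2"]
def pvRaiseWitnessOut_scoreCalculator : Int × Int := (5, 0)

def Spec_scoreCalculator (list : List String) (out : Int × Int) : Prop := out = scoreCalculator_alt list
instance (list : List String) (out : Int × Int) : Decidable (Spec_scoreCalculator list out) := by unfold Spec_scoreCalculator; infer_instance

-- ===== CLAIM (what is proved, stated in full; the proofs are below) =====
def Claim_equal_scoreCalculator : Prop := ∀ (list : List String), Dom_scoreCalculator list → Pre_scoreCalculator list → Spec_scoreCalculator list (scoreCalculator list)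

def Claim_raises_scoreCalculator : Prop :=
  (∀ (list : List String), Dom_scoreCalculator list → Raises_scoreCalculator list → ¬ Pre_scoreCalculator list) ∧
  (Dom_scoreCalculator (pvRaiseWitness_scoreCalculator) ∧ Raises_scoreCalculator (pvRaiseWitness_scoreCalculator) ∧
    scoreCalculator_alt (pvRaiseWitness_scoreCalculator) = pvRaiseWitnessOut_scoreCalculator)

-- ===== LEMMAS AND PROOFS =====

-- one event's contribution to a table: B's weighted indicator sum for that event
def pvG (table : List (String × Int)) (m : String) : Int :=
  (table.map (fun kp =>
    kp.2 * (if PySem.Str.slice m (some 0) (some 3) = kp.1 then (1 : Int) else 0))).sum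

theorem getD_pvCounts (l : List String) (k : String) :
    (pvCounts l).getD k 0 =
      ((l.map (fun m => PySem.Str.slice m (some 0) (some 3))).count k : Int) := by
  unfold pvCounts
  rw [PySem.Dict.getD_foldl_insert_add_one]
  simp

theorem pvTotal_counts (l : List String) (table : List (String × Int)) :
    pvTotal (pvCounts l) table = (l.map (pvG table)).sum := by
  induction l with
  | nil =>
    simp only [pvTotal, List.map_nil, List.sum_nil]
    induction table with
    | nil => simp
    | cons kp tb ih =>
      simp only [List.map_cons, List.sum_cons, getD_pvCounts] at *
      simp
  | cons m l ih =>
    have step : ∀ tb : List (String × Int),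
        pvTotal (pvCounts (m :: l)) tb = pvG tb m + pvTotal (pvCounts l) tb := by
      intro tb
      induction tb with
      | nil => simp [pvTotal, pvG]
      | cons kp t iht =>
        simp only [pvTotal, pvG, List.map_cons, List.sum_cons] at *
        rw [iht, getD_pvCounts, getD_pvCounts]
        have hc : ((m :: l).map (fun x => PySem.Str.slice x (some 0) (some 3))).count kp.1
            = (l.map (fun x => PySem.Str.slice x (some 0) (some 3))).count kp.1
              + (if PySem.Str.slice m (some 0) (some 3) = kp.1 then 1 else 0) := by
          simp [List.count_cons]
        rw [hc]
        push_cast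
        split_ifs <;> ring
    rw [List.map_cons, List.sum_cons, step, ih]

set_option maxHeartbeats 1600000 in
theorem pvFoldA (l : List String) (h : ∀ s ∈ l, s ≠ "T1" ∧ s ≠ "T2") (t : Int × Int) :
    l.foldl (fun st m =>
      if PySem.Str.slice m (some 0) (some 2) = "T1" then
        match PySem.Str.pyGet? m 2 with
        | some c =>
          if c = 't' then (st.1 + 5, st.2)
          else if c = 'c' then (st.1 + 2, st.2)
          else if c = 'p' then (st.1 + 3, st.2)
          else if c = 'd' then (st.1 + 3, st.2)
          else st
        | none => st
      else if PySem.Str.slice m (some 0) (some 2) = "T2" then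
        match PySem.Str.pyGet? m 2 with
        | some c =>
          if c = 't' then (st.1, st.2 + 5)
          else if c = 'c' then (st.1, st.2 + 2)
          else if c = 'p' then (st.1, st.2 + 3)
          else if c = 'd' then (st.1, st.2 + 3)
          else st
        | none => st
      else st) t
    = (t.1 + (l.map (pvG [("T1t", 5), ("T1c", 2), ("T1p", 3), ("T1d", 3)])).sum,
       t.2 + (l.map (pvG [("T2t", 5), ("T2c", 2), ("T2p", 3), ("T2d", 3)])).sum) := by
  induction l generalizing t with
  | nil => simp
  | cons m l ih =>
    obtain ⟨hm1, hm2⟩ := h m (List.mem_cons_self ..)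
    rw [List.foldl_cons, ih (fun s hs => h s (List.mem_cons_of_mem _ hs))]
    rcases hml : m.toList with _ | ⟨a, _ | ⟨b, _ | ⟨c, rest⟩⟩⟩
    · have hm : m = "" := String.toList_inj.mp (by simp [hml])
      subst hm
      have h1 : PySem.Str.slice "" (some 0) (some 2) ≠ "T1" := by decide
      have h2 : PySem.Str.slice "" (some 0) (some 2) ≠ "T2" := by decide
      have h3 : ∀ k : String, k.toList.length = 3 →
          PySem.Str.slice "" (some 0) (some 3) ≠ k := by
        intro k hk hh
        have := congrArg (fun s => s.toList.length) hh
        simp [pysem, hk] at this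
      simp only [if_neg h1, if_neg h2, pvG, List.map_cons, List.sum_cons, List.map_nil,
        List.sum_nil]
      rw [if_neg (h3 _ rfl), if_neg (h3 _ rfl), if_neg (h3 _ rfl), if_neg (h3 _ rfl),
        if_neg (h3 _ rfl), if_neg (h3 _ rfl), if_neg (h3 _ rfl), if_neg (h3 _ rfl)]
      simp
    · have hm : m = String.ofList [a] := String.toList_inj.mp (by simp [hml])
      subst hm
      have h1 : PySem.Str.slice (String.ofList [a]) (some 0) (some 2) ≠ "T1" := by
        intro hh
        have := congrArg String.toList hh
        simp [pysem] at this
      have h2 : PySem.Str.slice (String.ofList [a]) (some 0) (some 2) ≠ "T2" := by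
        intro hh
        have := congrArg String.toList hh
        simp [pysem] at this
      have h3 : ∀ k : String, k.toList.length = 3 →
          PySem.Str.slice (String.ofList [a]) (some 0) (some 3) ≠ k := by
        intro k hk hh
        have := congrArg (fun s => s.toList.length) hh
        simp [pysem, hk] at this
      simp only [if_neg h1, if_neg h2, pvG, List.map_cons, List.sum_cons, List.map_nil,
        List.sum_nil]
      rw [if_neg (h3 _ rfl), if_neg (h3 _ rfl), if_neg (h3 _ rfl), if_neg (h3 _ rfl),
        if_neg (h3 _ rfl), if_neg (h3 _ rfl), if_neg (h3 _ rfl), if_neg (h3 _ rfl)]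
      simp
    · -- length-2 string: slices are the whole string; m ≠ "T1","T2" by Pre_
      have hm : m = String.ofList [a, b] := String.toList_inj.mp (by simp [hml])
      subst hm
      have h1 : PySem.Str.slice (String.ofList [a, b]) (some 0) (some 2) ≠ "T1" := by
        intro hh
        have := congrArg String.toList hh
        simp [pysem] at this
        exact hm1 (by rw [this.1, this.2])
      have h2 : PySem.Str.slice (String.ofList [a, b]) (some 0) (some 2) ≠ "T2" := by
        intro hh
        have := congrArg String.toList hh
        simp [pysem] at this
        exact hm2 (by rw [this.1, this.2])
      have h3 : ∀ k : String, k.toList.length = 3 →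
          PySem.Str.slice (String.ofList [a, b]) (some 0) (some 3) ≠ k := by
        intro k hk hh
        have := congrArg (fun s => s.toList.length) hh
        simp [pysem, hk] at this
      simp only [if_neg h1, if_neg h2, pvG, List.map_cons, List.sum_cons, List.map_nil,
        List.sum_nil]
      rw [if_neg (h3 _ rfl), if_neg (h3 _ rfl), if_neg (h3 _ rfl), if_neg (h3 _ rfl),
        if_neg (h3 _ rfl), if_neg (h3 _ rfl), if_neg (h3 _ rfl), if_neg (h3 _ rfl)]
      simp
    · -- length ≥ 3: slice 0 2 = [a,b], slice 0 3 = [a,b,c], m[2] = c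
      have hget : PySem.Str.pyGet? m 2 = some c := by simp [pysem, hml]
      have hs2 : PySem.Str.slice m (some 0) (some 2) = String.ofList [a, b] := by
        apply String.toList_inj.mp; simp [pysem, hml]
      have hs3 : PySem.Str.slice m (some 0) (some 3) = String.ofList [a, b, c] := by
        apply String.toList_inj.mp; simp [pysem, hml]
      have hkey : ∀ x y z : Char, (String.ofList [a, b, c] = String.ofList [x, y, z]) ↔
          (a = x ∧ b = y ∧ c = z) := by
        intro x y z
        constructor
        · intro hh
          have := congrArg String.toList hh
          simp at this
          exact this
        · rintro ⟨rfl, rfl, rfl⟩; rfl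
      have hab1 : (String.ofList [a, b] = ("T1" : String)) ↔ (a = 'T' ∧ b = '1') := by
        constructor
        · intro hh; have := congrArg String.toList hh; simp at this; exact this
        · rintro ⟨rfl, rfl⟩; rfl
      have hab2 : (String.ofList [a, b] = ("T2" : String)) ↔ (a = 'T' ∧ b = '2') := by
        constructor
        · intro hh; have := congrArg String.toList hh; simp at this; exact this
        · rintro ⟨rfl, rfl⟩; rfl
      simp only [pvG, List.map_cons, List.sum_cons, List.map_nil, List.sum_nil, hs2, hs3,
        hget]
      have e1 : ("T1t" : String) = String.ofList ['T', '1', 't'] := rfl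
      have e2 : ("T1c" : String) = String.ofList ['T', '1', 'c'] := rfl
      have e3 : ("T1p" : String) = String.ofList ['T', '1', 'p'] := rfl
      have e4 : ("T1d" : String) = String.ofList ['T', '1', 'd'] := rfl
      have f1 : ("T2t" : String) = String.ofList ['T', '2', 't'] := rfl
      have f2 : ("T2c" : String) = String.ofList ['T', '2', 'c'] := rfl
      have f3 : ("T2p" : String) = String.ofList ['T', '2', 'p'] := rfl
      have f4 : ("T2d" : String) = String.ofList ['T', '2', 'd'] := rfl
      simp only [e1, e2, e3, e4, f1, f2, f3, f4, hkey, hab1, hab2]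
      clear ih h hml hget hs2 hs3 e1 e2 e3 e4 f1 f2 f3 f4 hkey hab1 hab2
      by_cases ha : a = 'T' <;> by_cases hb1 : b = '1' <;> by_cases hb2 : b = '2' <;>
        by_cases hc1 : c = 't' <;> by_cases hc2 : c = 'c' <;> by_cases hc3 : c = 'p' <;>
        by_cases hc4 : c = 'd' <;>
        simp_all [Prod.ext_iff] <;> omega

-- ===== VERDICT (by name: the statement is the Claim_ definition above) =====
theorem scoreCalculator_spec : Claim_equal_scoreCalculator := by
  intro l _ hpre
  unfold Spec_scoreCalculator scoreCalculator scoreCalculator_alt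
  rw [pvFoldA l hpre (0, 0)]
  simp [pvTotal_counts]

def scoreCalculator_raises : Claim_raises_scoreCalculator := by
  unfold Claim_raises_scoreCalculator
  refine ⟨?_, by decide⟩
  rintro l _ ⟨s, hs, h⟩ hpre
  rcases h with h | h
  · exact (hpre s hs).1 h
  · exact (hpre s hs).2 h
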